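-- pv_equiv track=rewrite | github.com/Outlast18363/balatro-rl-agent | Balatro_lite_gym/util.py | _is_straight_ranks
-- ===== SOURCE A (Python) =====
-- def _is_straight_ranks(ranks: list[int]) -> bool:
--     """Five distinct ranks forming a straight (wheel or Broadway special-cased)."""
--     if len(ranks) != 5:
--         return False
--     u = sorted(set(ranks))
--     if len(u) != 5:
--         return False
--     if u == [0, 1, 2, 3, 4]:
--         return True
--     if set(u) == {0, 9, 10, 11, 12}:
--         return True
--     return u[-1] - u[0] == 4 and all(u[i + 1] - u[i] == 1 for i in range(4))
-- ===== SOURCE B (Python) =====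
-- def _is_straight_ranks(ranks: list[int]) -> bool:
--     """Five distinct ranks forming a straight (wheel or Broadway special-cased)."""
--     if len(ranks) != 5:
--         return False
--     s = set(ranks)
--     if len(s) != 5:
--         return False
--     return max(s) - min(s) == 4 or s == {0, 9, 10, 11, 12}
-- ===== Notes on version B (the rewrite author's own statement) =====
-- stated objective: simpler
-- what changed: Replaces sort-then-adjacent-difference scanning (plus a redundant [0,1,2,3,4] special case) with a single max-min==4 test on the 5 distinct ranks, plus the Broadway set check; no sorting or diff loop.
import Mathlib
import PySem

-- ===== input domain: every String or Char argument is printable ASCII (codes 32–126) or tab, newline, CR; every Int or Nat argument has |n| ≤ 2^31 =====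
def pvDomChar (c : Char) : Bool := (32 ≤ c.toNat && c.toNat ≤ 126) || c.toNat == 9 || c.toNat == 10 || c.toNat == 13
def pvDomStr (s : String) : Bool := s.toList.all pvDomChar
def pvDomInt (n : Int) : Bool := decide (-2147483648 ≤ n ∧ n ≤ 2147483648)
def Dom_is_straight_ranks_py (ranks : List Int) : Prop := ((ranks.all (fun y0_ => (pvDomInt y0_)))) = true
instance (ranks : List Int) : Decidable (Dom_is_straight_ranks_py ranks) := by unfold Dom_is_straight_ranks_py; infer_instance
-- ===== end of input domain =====

-- B replaces A's sort + adjacent-difference scan by a max-min==4 test on the 5 distinct ranks (simpler, no sort).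


-- ===== PORT A =====
def is_straight_ranks_py (ranks : List Int) : Bool :=
  if ranks.length ≠ 5 then false
  else
    let u := PySem.List.sorted (PySem.Set.ofList ranks) (fun x => x) false
    if u.length ≠ 5 then false
    else if u = [0, 1, 2, 3, 4] then true
    else if PySem.Set.equal (PySem.Set.ofList u) (PySem.Set.ofList [0, 9, 10, 11, 12]) then true
    else decide (PySem.List.pyGetD u (-1) 0 - PySem.List.pyGetD u 0 0 = 4) &&
      (PySem.List.pyRange 0 4 1).all fun i =>
        decide (PySem.List.pyGetD u (i + 1) 0 - PySem.List.pyGetD u i 0 = 1)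

-- ===== PORT B =====
def is_straight_ranks_py_alt (ranks : List Int) : Bool :=
  if ranks.length ≠ 5 then false
  else
    let s := PySem.Set.ofList ranks
    if s.length ≠ 5 then false
    else
      -- s is nonempty here, so max?/min? are some; the 'false' arm is a totality guard only
      match PySem.List.max? s (fun x => x), PySem.List.min? s (fun x => x) with
      | some mx, some mn => decide (mx - mn = 4) || PySem.Set.equal s (PySem.Set.ofList [0, 9, 10, 11, 12])
      | _, _ => false

-- ===== PRECONDITION & SPEC =====
def Spec_is_straight_ranks_py (ranks : List Int) (out : Bool) : Prop := out = is_straight_ranks_py_alt ranks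
instance (ranks : List Int) (out : Bool) : Decidable (Spec_is_straight_ranks_py ranks out) := by unfold Spec_is_straight_ranks_py; infer_instance

-- ===== CLAIM (what is proved, stated in full; the proofs are below) =====
def Claim_equal_is_straight_ranks_py : Prop := ∀ (ranks : List Int), Dom_is_straight_ranks_py ranks → Spec_is_straight_ranks_py ranks (is_straight_ranks_py ranks)

-- ===== LEMMAS AND PROOFS =====

-- On a strictly increasing 5-element list, A's scan condition and B's max-min condition coincide,
-- and both Broadway checks compare the same set; this reduces the equivalence to Int arithmetic.
theorem is_straight_key (ranks : List Int) :
    is_straight_ranks_py ranks = is_straight_ranks_py_alt ranks := by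
  unfold is_straight_ranks_py is_straight_ranks_py_alt
  by_cases h5 : ranks.length = 5
  · simp only [h5, ne_eq, not_true_eq_false, if_false]
    set s := PySem.Set.ofList ranks with hs
    have hperm : (PySem.List.sorted s (fun x => x) false).Perm s := PySem.List.sorted_perm ..
    have hlen : (PySem.List.sorted s (fun x => x) false).length = s.length :=
      hperm.length_eq
    by_cases hslen : s.length = 5
    · have hmem : ∀ x, x ∈ PySem.List.sorted s (fun x => x) false ↔ x ∈ s := by
        intro x; exact ⟨fun h => hperm.mem_iff.mp h, fun h => hperm.mem_iff.mpr h⟩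
      have hinc : (PySem.List.sorted s (fun x => x) false).Pairwise (· < ·) :=
        PySem.List.sorted_ofList_pairwise_lt ranks
      -- destructure the sorted list
      rw [hslen] at hlen
      obtain ⟨a, b, c, d, e, hu⟩ : ∃ a b c d e,
          PySem.List.sorted s (fun x => x) false = [a, b, c, d, e] := by
        match hxu : PySem.List.sorted s (fun x => x) false with
        | [x1, x2, x3, x4, x5] => exact ⟨x1, x2, x3, x4, x5, rfl⟩
        | [] | [_] | [_,_] | [_,_,_] | [_,_,_,_] => simp [hxu] at hlen
        | _::_::_::_::_::_::_ => simp [hxu] at hlen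
      rw [hu] at hinc hmem
      simp only [List.pairwise_cons, List.mem_cons, List.not_mem_nil, or_false,
        forall_eq_or_imp, forall_eq, List.Pairwise.nil, and_true] at hinc
      obtain ⟨⟨hab, hac, had, hae⟩, ⟨hbc, hbd, hbe⟩, ⟨hcd, hce⟩, hde, -⟩ := hinc
      -- B's max and min are e and a
      have hemem : e ∈ s := (hmem e).mp (by simp)
      have hamem : a ∈ s := (hmem a).mp (by simp)
      have hne : s ≠ [] := by intro h; simp [h] at hslen
      obtain ⟨mx, hmx⟩ : ∃ mx, PySem.List.max? s (fun x => x) = some mx := by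
        cases hmo : PySem.List.max? s (fun x => x) with
        | none => exact absurd ((PySem.List.max?_eq_none_iff s (fun x => x)).mp hmo) hne
        | some m => exact ⟨m, rfl⟩
      obtain ⟨mn, hmn⟩ : ∃ mn, PySem.List.min? s (fun x => x) = some mn := by
        cases hmo : PySem.List.min? s (fun x => x) with
        | none => exact absurd ((PySem.List.min?_eq_none_iff s (fun x => x)).mp hmo) hne
        | some m => exact ⟨m, rfl⟩
      have hmxe : mx = e := by
        have h1 : e ≤ mx := PySem.List.max?_isMax hmx e hemem
        have h2 : mx ∈ s := PySem.List.max?_mem hmx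
        have h3 : mx ∈ [a, b, c, d, e] := (hmem mx).mpr h2
        simp only [List.mem_cons, List.not_mem_nil, or_false] at h3
        rcases h3 with h | h | h | h | h <;> omega
      have hmna : mn = a := by
        have h1 : mn ≤ a := PySem.List.min?_isMin hmn a hamem
        have h2 : mn ∈ s := PySem.List.min?_mem hmn
        have h3 : mn ∈ [a, b, c, d, e] := (hmem mn).mpr h2
        simp only [List.mem_cons, List.not_mem_nil, or_false] at h3
        rcases h3 with h | h | h | h | h <;> omega
      have hnd : ([a, b, c, d, e] : List Int).Nodup := by
        simp only [List.nodup_cons, List.mem_cons, List.not_mem_nil, or_false,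
          List.nodup_nil, and_true, not_or, not_false_eq_true]
        omega
      -- the two Broadway set checks agree
      have hseteq : PySem.Set.equal (PySem.Set.ofList [a, b, c, d, e])
          (PySem.Set.ofList [(0 : Int), 9, 10, 11, 12]) =
          PySem.Set.equal s (PySem.Set.ofList [(0 : Int), 9, 10, 11, 12]) := by
        rw [PySem.Set.ofList_eq_self_of_nodup _ hnd]
        by_cases h : PySem.Set.equal s (PySem.Set.ofList [(0 : Int), 9, 10, 11, 12]) = true
        · rw [h, PySem.Set.equal_iff]
          intro x
          rw [hmem x]
          exact (PySem.Set.equal_iff s _).mp h x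
        · rw [eq_false_of_ne_true h]
          apply eq_false_of_ne_true
          intro hc
          apply h
          rw [PySem.Set.equal_iff] at hc ⊢
          intro x
          rw [← hmem x]
          exact hc x
      rw [hu, hslen, hmx, hmn, hmxe, hmna]
      simp only [not_true_eq_false, if_false, hseteq]
      by_cases hbw : PySem.Set.equal s (PySem.Set.ofList [(0 : Int), 9, 10, 11, 12]) = true
      · simp [hbw]
      · rw [eq_false_of_ne_true hbw]
        simp only [Bool.or_false]
        by_cases h04 : ([a, b, c, d, e] : List Int) = [0, 1, 2, 3, 4]
        · simp only [List.cons.injEq, and_true] at h04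
          obtain ⟨ha, hb', hc', hd', he⟩ := h04
          simp [ha, hb', hc', hd', he]
        · simp only [if_neg h04]
          have hrange : PySem.List.pyRange 0 4 1 = [0, 1, 2, 3] := by decide
          simp only [hrange, List.all_cons, List.all_nil, Bool.and_true]
          have g1 : PySem.List.pyGetD ([a, b, c, d, e] : List Int) (-1) 0 = e := by
            simp [PySem.List.pyGetD, PySem.List.pyGet?, PySem.List.pyIdx?]
          have g2 : PySem.List.pyGetD ([a, b, c, d, e] : List Int) 0 0 = a := by
            simp [PySem.List.pyGetD, PySem.List.pyGet?, PySem.List.pyIdx?]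
          have g3 : PySem.List.pyGetD ([a, b, c, d, e] : List Int) 1 0 = b := by
            simp [PySem.List.pyGetD, PySem.List.pyGet?, PySem.List.pyIdx?]
          have g4 : PySem.List.pyGetD ([a, b, c, d, e] : List Int) 2 0 = c := by
            simp [PySem.List.pyGetD, PySem.List.pyGet?, PySem.List.pyIdx?]
          have g5 : PySem.List.pyGetD ([a, b, c, d, e] : List Int) 3 0 = d := by
            simp [PySem.List.pyGetD, PySem.List.pyGet?, PySem.List.pyIdx?]
          have g6 : PySem.List.pyGetD ([a, b, c, d, e] : List Int) 4 0 = e := by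
            simp [PySem.List.pyGetD, PySem.List.pyGet?, PySem.List.pyIdx?]
          have e01 : (0 : Int) + 1 = 1 := by norm_num
          have e12 : (1 : Int) + 1 = 2 := by norm_num
          have e23 : (2 : Int) + 1 = 3 := by norm_num
          have e34 : (3 : Int) + 1 = 4 := by norm_num
          rw [e01, e12, e23, e34, g1, g2, g3, g4, g5, g6]
          rcases Decidable.em (e - a = 4) with h | h
          · have hd1 : b - a = 1 := by omega
            have hd2 : c - b = 1 := by omega
            have hd3 : d - c = 1 := by omega
            have hd4 : e - d = 1 := by omega
            simp [h, hd1, hd2, hd3, hd4]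
          · simp [h]
    · simp [hlen, hslen]
  · simp [h5]

-- ===== VERDICT (by name: the statement is the Claim_ definition above) =====
theorem is_straight_ranks_py_spec : Claim_equal_is_straight_ranks_py := by
  intro ranks _
  unfold Spec_is_straight_ranks_py
  exact is_straight_key ranks
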